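-- pv_equiv track=rewrite | github.com/pkw3322/CodingStudy | programmers/programmers할인_행사.py | solution
-- ===== SOURCE A (Python) =====
-- def solution(want, number, discount):
--     answer = 0
--     dict = {}
--     for i in range(len(want)):
--         dict[want[i]] = number[i]
--
--     for i in range(len(discount)-9):
--         temp = dict.copy()
--         for j in range(i, i+10):
--             if discount[j] in temp:
--                 temp[discount[j]] -= 1
--                 if temp[discount[j]] == 0:
--                     temp.pop(discount[j],None)
--         if temp == {}:
--             answer += 1
--     return answer
-- ===== SOURCE B (Python) =====
-- def solution(want, number, discount):
--     # required counts: last assignment wins, exactly like building a dict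
--     req = {}
--     for w, n in zip(want, number):
--         req[w] = n
--     if len(discount) < 10:
--         return 0
--     # counts of wanted items in the current 10-day window, maintained incrementally,
--     # plus 'met' = how many wanted items currently meet their requirement
--     cnt = {}
--     for d in discount[:10]:
--         if d in req:
--             cnt[d] = cnt.get(d, 0) + 1
--     met = 0
--     for w, n in req.items():
--         if n >= 1 and cnt.get(w, 0) >= n:
--             met += 1
--     need = len(req)
--     answer = 1 if met == need else 0
--     for i in range(10, len(discount)):
--         out = discount[i - 10]
--         if out in req:
--             c = cnt.get(out, 0) - 1
--             cnt[out] = c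
--             if c == req[out] - 1:
--                 met -= 1
--         new = discount[i]
--         if new in req:
--             c = cnt.get(new, 0) + 1
--             cnt[new] = c
--             if c == req[new]:
--                 met += 1
--         if met == need:
--             answer += 1
--     return answer
-- ===== Notes on version B (the rewrite author's own statement) =====
-- stated objective: faster
-- what changed: A re-scans every 10-day window with a fresh copy of the requirement dict, decrementing and popping entries; B slides the window one day at a time, incrementally maintaining per-item counts and a 'met' tally of satisfied requirements, so each position costs O(1) dict work instead of a full window/dict scan.
import Mathlib
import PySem

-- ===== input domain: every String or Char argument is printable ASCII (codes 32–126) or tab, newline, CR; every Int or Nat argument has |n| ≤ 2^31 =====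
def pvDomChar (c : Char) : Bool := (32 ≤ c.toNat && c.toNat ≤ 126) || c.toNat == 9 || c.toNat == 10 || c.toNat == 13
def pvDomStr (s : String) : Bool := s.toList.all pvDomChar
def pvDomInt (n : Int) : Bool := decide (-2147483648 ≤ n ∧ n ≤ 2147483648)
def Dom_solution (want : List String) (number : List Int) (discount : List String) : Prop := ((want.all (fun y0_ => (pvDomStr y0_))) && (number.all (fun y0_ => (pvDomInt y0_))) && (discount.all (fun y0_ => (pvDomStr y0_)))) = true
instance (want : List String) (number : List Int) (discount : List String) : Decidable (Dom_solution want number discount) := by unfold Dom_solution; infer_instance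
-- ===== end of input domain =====

-- B replaces A's per-window dict-copy-and-decrement scan by a sliding window with
-- incrementally maintained counts and a 'met' tally (measured faster; return value only).

-- ===== PORT A =====
def solution (want : List String) (number : List Int) (discount : List String) : Int :=
  let d := (PySem.List.pyRange 0 want.length 1).foldl
      (fun d i => d.insert (PySem.List.pyGetD want i "") (PySem.List.pyGetD number i 0))
      PySem.Dict.empty
  (PySem.List.pyRange 0 ((discount.length : Int) - 9) 1).foldl
    (fun answer i =>
      let temp := (PySem.List.pyRange i (i + 10) 1).foldl
        (fun temp j =>
          if temp.contains (PySem.List.pyGetD discount j "") then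
            let temp2 := temp.modify (PySem.List.pyGetD discount j "") 0 (· - 1)
            if temp2.getD (PySem.List.pyGetD discount j "") 0 = 0 then
              temp2.erase (PySem.List.pyGetD discount j "")
            else temp2
          else temp) d
      if temp.items = [] then answer + 1 else answer) 0

-- ===== PORT B =====
def solution_alt (want : List String) (number : List Int) (discount : List String) : Int :=
  let req := (want.zip number).foldl (fun d p => d.insert p.1 p.2) PySem.Dict.empty
  if discount.length < 10 then 0 else
  let cnt := (PySem.List.slice discount none (some 10)).foldl
      (fun c d => if req.contains d then c.insert d (c.getD d 0 + 1) else c) PySem.Dict.empty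
  let met : Int := req.items.foldl
      (fun met p => if 1 ≤ p.2 ∧ p.2 ≤ cnt.getD p.1 0 then met + 1 else met) 0
  let need : Int := req.size
  let answer : Int := if met = need then 1 else 0
  ((PySem.List.pyRange 10 (discount.length : Int) 1).foldl
      (fun st i =>
        let answer := st.1
        let cnt := st.2.1
        let met := st.2.2
        let out := PySem.List.pyGetD discount (i - 10) ""
        let st1 :=
          if req.contains out then
            let c := cnt.getD out 0 - 1
            ((cnt.insert out c), (if c = req.getD out 0 - 1 then met - 1 else met))
          else (cnt, met)
        let nw := PySem.List.pyGetD discount i ""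
        let st2 :=
          if req.contains nw then
            let c := st1.1.getD nw 0 + 1
            ((st1.1.insert nw c), (if c = req.getD nw 0 then st1.2 + 1 else st1.2))
          else st1
        ((if st2.2 = need then answer + 1 else answer), st2.1, st2.2))
      (answer, cnt, met)).1

-- ===== PRECONDITION & SPEC =====
-- Pre_ excludes exactly the inputs where A raises IndexError: number shorter than want.
def Pre_solution (want : List String) (number : List Int) (discount : List String) : Prop :=
  want.length ≤ number.length
instance (want : List String) (number : List Int) (discount : List String) : Decidable (Pre_solution want number discount) := by unfold Pre_solution; infer_instance
def pvWitness_solution : List String × List Int × List String := (["a"], [2], [])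

def Spec_solution (want : List String) (number : List Int) (discount : List String) (out : Int) : Prop := out = solution_alt want number discount
instance (want : List String) (number : List Int) (discount : List String) (out : Int) : Decidable (Spec_solution want number discount out) := by unfold Spec_solution; infer_instance

-- ===== CLAIM (what is proved, stated in full; the proofs are below) =====
def Claim_equal_solution : Prop := ∀ (want : List String) (number : List Int) (discount : List String), Dom_solution want number discount → Pre_solution want number discount → Spec_solution want number discount (solution want number discount)

-- ===== LEMMAS AND PROOFS =====


theorem find?_filter_ne (l : List (String × Int)) (x k : String) :
    List.find? (fun p => p.1 == k) (l.filter (fun p => !(p.1 == x)))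
      = if k = x then none else List.find? (fun p => p.1 == k) l := by
  induction l with
  | nil => simp
  | cons a l ih =>
    rw [List.filter_cons]
    by_cases hax : a.1 = x
    · simp only [hax, beq_self_eq_true, Bool.not_true, if_neg (by simp : ¬ (false = true))]
      rw [ih, List.find?_cons]
      by_cases hk : k = x
      · simp [hk]
      · have : (a.1 == k) = false := by simp; intro h; exact hk (by rw [← h, hax])
        simp [this]
    · have hfa : (!(a.1 == x)) = true := by simp [hax]
      rw [if_pos hfa, List.find?_cons, List.find?_cons]
      by_cases hak : a.1 = k
      · have hkx : ¬ k = x := fun h => hax (by rw [hak, h])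
        simp [hak, hkx]
      · simp only [show (a.1 == k) = false by simp [hak]]
        rw [ih]

theorem get?_erase' (d : PySem.Dict String Int) (x k : String) :
    (d.erase x).get? k = if k = x then none else d.get? k := by
  show Option.map _ (List.find? _ (d.items.filter _)) = _
  rw [find?_filter_ne]
  split <;> rfl

theorem nodup_keys_erase (d : PySem.Dict String Int) (x : String) (h : d.keys.Nodup) :
    (d.erase x).keys.Nodup := by
  have : (d.erase x).keys.Sublist d.keys := List.Sublist.map _ List.filter_sublist
  exact this.nodup h

def dstep (temp : PySem.Dict String Int) (s : String) : PySem.Dict String Int :=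
  if temp.contains s then
    let temp2 := temp.modify s 0 (· - 1)
    if temp2.getD s 0 = 0 then temp2.erase s else temp2
  else temp

theorem nodup_keys_dstep (t : PySem.Dict String Int) (s : String) (h : t.keys.Nodup) :
    (dstep t s).keys.Nodup := by
  unfold dstep
  have hmod : (t.modify s 0 (· - 1)).keys.Nodup := by
    rw [PySem.Dict.keys_modify]
    exact PySem.Dict.nodup_keys_insert t s _ h
  by_cases hcon : t.contains s = true
  · rw [if_pos hcon]
    show PySem.Dict.keys (if (t.modify s 0 (· - 1)).getD s 0 = 0 then (t.modify s 0 (· - 1)).erase s else t.modify s 0 (· - 1)) |>.Nodup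
    split
    · exact nodup_keys_erase _ _ hmod
    · exact hmod
  · rw [if_neg hcon]; exact h

theorem get?_dstep (t : PySem.Dict String Int) (s k : String) :
    (dstep t s).get? k =
      match t.get? s with
      | none => t.get? k
      | some v => if k = s then (if v - 1 = 0 then none else some (v - 1)) else t.get? k := by
  unfold dstep
  have hmod : ∀ k', (t.modify s 0 (· - 1)).get? k' = if k' = s then some (t.getD s 0 - 1) else t.get? k' := by
    intro k'; show (t.insert s _).get? k' = _; rw [PySem.Dict.get?_insert]
  rw [PySem.Dict.contains_eq_isSome_get?]
  cases hv : t.get? s with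
  | none => simp [hv]
  | some v =>
    have hgD : t.getD s 0 = v := by rw [PySem.Dict.getD_eq_get?_getD, hv]; rfl
    simp only [hv, Option.isSome_some, if_pos rfl]
    rw [PySem.Dict.getD_eq_get?_getD, hmod s, if_pos rfl]
    simp only [Option.getD_some, hgD]
    by_cases hz : v - 1 = 0
    · rw [if_pos hz, if_pos trivial, get?_erase']
      by_cases hk : k = s
      · simp [hk, hz]
      · simp [hk, hmod, hz]
    · rw [if_neg hz, if_pos trivial]
      by_cases hk : k = s
      · simp [hk, hmod, hgD, hz]
      · simp [hk, hmod, hz]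

theorem foldl_dstep_get? (w : List String) :
    ∀ (d : PySem.Dict String Int), d.keys.Nodup → ∀ k,
      (w.foldl dstep d).get? k =
        (d.get? k).bind (fun v =>
          if 1 ≤ v ∧ v ≤ (w.count k : Int) then none else some (v - (w.count k : Int))) := by
  induction w with
  | nil =>
    intro d _ k
    cases hv : d.get? k with
    | none => simp [hv]
    | some v =>
      simp only [List.foldl_nil, hv, Option.bind_some, List.count_nil]
      rw [if_neg (by push_cast; omega)]
      simp
  | cons x w ih =>
    intro d hnd k
    rw [List.foldl_cons, ih (dstep d x) (nodup_keys_dstep d x hnd) k, get?_dstep]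
    cases hvx : d.get? x with
    | none =>
      dsimp only
      by_cases hk : k = x
      · rw [hk, hvx]; simp
      · have : (x == k) = false := by simp; exact fun h => hk h.symm
        rw [List.count_cons, this]
        simp
    | some v0 =>
      dsimp only
      by_cases hk : k = x
      · subst hk
        rw [if_pos rfl, List.count_cons, beq_self_eq_true, hvx]
        simp only [if_pos rfl, Option.bind_some]
        by_cases hz : v0 - 1 = 0
        · rw [if_pos hz, Option.bind_none]
          rw [if_pos (by push_cast; omega)]
        · rw [if_neg hz, Option.bind_some]
          by_cases hc : 1 ≤ v0 - 1 ∧ v0 - 1 ≤ (w.count k : Int)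
          · rw [if_pos hc, if_pos (by push_cast; omega)]
          · rw [if_neg hc, if_neg (by push_cast; omega)]
            congr 1
            push_cast
            ring
      · have hxk : (x == k) = false := by simp; exact fun h => hk h.symm
        rw [if_neg hk, List.count_cons, hxk]
        simp

def goodW (req : PySem.Dict String Int) (w : List String) : Bool :=
  req.items.all (fun p => decide (1 ≤ p.2 ∧ p.2 ≤ (w.count p.1 : Int)))

theorem empty_iff (w : List String) (d : PySem.Dict String Int) (h : d.keys.Nodup) :
    ((w.foldl dstep d).items = []) ↔ goodW d w = true := by
  have hchar := foldl_dstep_get? w d h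
  constructor
  · intro hempty
    rw [goodW, List.all_eq_true]
    intro p hp
    have hg : d.get? p.1 = some p.2 := (PySem.Dict.get?_eq_some_iff_mem_items d p.1 p.2 h).mpr hp
    have hnone : (w.foldl dstep d).get? p.1 = none := by
      show Option.map _ (List.find? _ (w.foldl dstep d).items) = none
      rw [hempty]; rfl
    rw [hchar p.1, hg] at hnone
    simp only [Option.bind_some] at hnone
    by_cases hcond : 1 ≤ p.2 ∧ p.2 ≤ (w.count p.1 : Int)
    · exact decide_eq_true hcond
    · rw [if_neg hcond] at hnone; exact absurd hnone (by simp)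
  · intro hgood
    cases hitems : (w.foldl dstep d).items with
    | nil => rfl
    | cons q rest =>
      exfalso
      have hsome : (w.foldl dstep d).get? q.1 = some q.2 := by
        show Option.map _ (List.find? _ (w.foldl dstep d).items) = some q.2
        rw [hitems, List.find?_cons]
        simp
      rw [hchar q.1] at hsome
      cases hv : d.get? q.1 with
      | none => rw [hv] at hsome; exact absurd hsome (by simp)
      | some v =>
        rw [hv] at hsome
        have hmem : (q.1, v) ∈ d.items := (PySem.Dict.get?_eq_some_iff_mem_items d q.1 v h).mp hv
        have := List.all_eq_true.mp (by rw [← goodW]; exact hgood) _ hmem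
        simp only [decide_eq_true_eq] at this
        rw [Option.bind_some, if_pos this] at hsome
        exact absurd hsome (by simp)

def reqOf (want : List String) (number : List Int) : PySem.Dict String Int :=
  (want.zip number).foldl (fun d p => d.insert p.1 p.2) PySem.Dict.empty

def winAt (discount : List String) (s : Nat) : List String := (discount.drop s).take 10

def countF (req : PySem.Dict String Int) (discount : List String) : Int :=
  ((List.range ((discount.length : Int) - 9).toNat).countP
      (fun s => goodW req (winAt discount s)) : Int)

theorem req_eq (want : List String) (number : List Int) (h : want.length ≤ number.length) :
    (PySem.List.pyRange 0 want.length 1).foldl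
        (fun d i => d.insert (PySem.List.pyGetD want i "") (PySem.List.pyGetD number i 0))
        PySem.Dict.empty
      = reqOf want number := by
  rw [PySem.List.pyRange_one]
  have hlen : ((want.length : Int) - 0).toNat = want.length := by simp
  rw [hlen, List.foldl_map]
  simp only [zero_add, PySem.List.pyGetD_natCast]
  have hmap : (List.range want.length).map (fun k => ((want.getD k ""), (number.getD k 0)))
      = want.zip number := by
    apply List.ext_getElem
    · simp [h]
    · intro i h1 h2
      simp only [List.getElem_map, List.getElem_range, List.getElem_zip]
      have hi : i < want.length := by simpa using h1
      rw [List.getD_eq_getElem _ _ hi, List.getD_eq_getElem _ _ (lt_of_lt_of_le hi h)]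
  rw [reqOf, ← hmap, List.foldl_map]

theorem nodup_keys_reqOf (want : List String) (number : List Int) :
    (reqOf want number).keys.Nodup :=
  PySem.Dict.nodup_keys_foldl_insert_key _ Prod.fst (fun _ x => x.2) _ PySem.Dict.nodup_keys_empty

theorem map_window (discount : List String) (i : Nat) (h : i + 10 ≤ discount.length) :
    (PySem.List.pyRange (i : Int) ((i : Int) + 10) 1).map
        (fun j => PySem.List.pyGetD discount j "") = winAt discount i := by
  rw [PySem.List.pyRange_one]
  have h10 : (((i : Int) + 10) - i).toNat = 10 := by omega
  rw [h10, List.map_map]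
  apply List.ext_getElem
  · simp [winAt]; omega
  · intro j h1 h2
    simp only [List.getElem_map, List.getElem_range, Function.comp]
    have hj : j < 10 := by simpa using h1
    have hcast : ((i : Int) + (j : Int)) = ((i + j : Nat) : Int) := by push_cast; ring
    rw [hcast, PySem.List.pyGetD_natCast, List.getD_eq_getElem _ _ (by omega)]
    simp only [winAt, List.getElem_take, List.getElem_drop]

theorem A_char (want : List String) (number : List Int) (discount : List String)
    (h : want.length ≤ number.length) :
    solution want number discount = countF (reqOf want number) discount := by
  have hrfl : solution want number discount
      = (PySem.List.pyRange 0 ((discount.length : Int) - 9) 1).foldl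
          (fun answer i =>
            if ((PySem.List.pyRange i (i + 10) 1).foldl
                (fun temp j => dstep temp (PySem.List.pyGetD discount j ""))
                ((PySem.List.pyRange 0 want.length 1).foldl
                  (fun d i => d.insert (PySem.List.pyGetD want i "") (PySem.List.pyGetD number i 0))
                  PySem.Dict.empty)).items = []
            then answer + 1 else answer) 0 := rfl
  rw [hrfl, req_eq want number h]
  rw [PySem.List.foldl_ite_add_one
      (fun i : Int => ((PySem.List.pyRange i (i + 10) 1).foldl
        (fun temp j => dstep temp (PySem.List.pyGetD discount j "")) (reqOf want number)).items = [])]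
  rw [zero_add, PySem.List.pyRange_one]
  have hn : (((discount.length : Int) - 9) - 0).toNat = ((discount.length : Int) - 9).toNat := by omega
  rw [hn, List.countP_map]
  rw [countF]
  congr 1
  apply List.countP_congr
  intro s hs
  rw [List.mem_range] at hs
  have hwin : s + 10 ≤ discount.length := by omega
  simp only [Function.comp, zero_add]
  have hfold : (PySem.List.pyRange (s : Int) ((s : Int) + 10) 1).foldl
      (fun temp j => dstep temp (PySem.List.pyGetD discount j "")) (reqOf want number)
      = (winAt discount s).foldl dstep (reqOf want number) := by
    rw [← map_window discount s hwin, List.foldl_map]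
  rw [hfold]
  cases hgw : goodW (reqOf want number) (winAt discount s)
  · have hne : ¬ ((winAt discount s).foldl dstep (reqOf want number)).items = [] := by
      intro hh
      rw [(empty_iff _ _ (nodup_keys_reqOf want number)).mp hh] at hgw
      exact absurd hgw (by simp)
    simp [hne]
  · simp [(empty_iff _ _ (nodup_keys_reqOf want number)).mpr hgw]

def metG (req : PySem.Dict String Int) (g : String → Int) : Int :=
  (req.items.countP (fun p => decide (1 ≤ p.2 ∧ p.2 ≤ g p.1)) : Int)

theorem cnt_fold (req : PySem.Dict String Int) (xs : List String) :
    ∀ (c : PySem.Dict String Int) (k : String),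
      (xs.foldl (fun c d => if req.contains d then c.insert d (c.getD d 0 + 1) else c) c).getD k 0
        = c.getD k 0 + (if req.contains k then (xs.count k : Int) else 0) := by
  induction xs with
  | nil => intro c k; simp
  | cons x xs ih =>
    intro c k
    rw [List.foldl_cons, ih]
    by_cases hcx : req.contains x = true
    · rw [if_pos hcx]
      by_cases hk : k = x
      · subst hk
        rw [PySem.Dict.getD_insert, if_pos rfl, if_pos hcx, if_pos hcx, List.count_cons]
        simp only [beq_self_eq_true, if_pos rfl]
        push_cast; ring
      · rw [PySem.Dict.getD_insert, if_neg hk, List.count_cons,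
            show (x == k) = false by simp; exact fun hh => hk hh.symm]
        simp
    · rw [if_neg hcx]
      by_cases hk : k = x
      · subst hk; rw [if_neg hcx, if_neg hcx]
      · rw [List.count_cons, show (x == k) = false by simp; exact fun hh => hk hh.symm]
        simp

theorem countP_off_upd (l : List (String × Int)) (k0 : String) (hk : k0 ∉ l.map Prod.fst)
    (p q : String × Int → Bool) (hoff : ∀ x ∈ l, x.1 ≠ k0 → p x = q x) :
    l.countP q = l.countP p := by
  apply List.countP_congr
  intro x hx
  rw [hoff x hx (fun hh => hk (hh ▸ List.mem_map_of_mem hx))]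

theorem countP_mem_upd (l : List (String × Int)) (hnd : (l.map Prod.fst).Nodup)
    (k0 : String) (v0 : Int) (hmem : (k0, v0) ∈ l) (p q : String × Int → Bool)
    (hoff : ∀ x ∈ l, x.1 ≠ k0 → p x = q x) :
    (l.countP q : Int) = (l.countP p : Int)
      + ((if q (k0, v0) then 1 else 0) - (if p (k0, v0) then 1 else 0)) := by
  obtain ⟨l1, l2, rfl⟩ := List.append_of_mem hmem
  rw [List.map_append, List.map_cons] at hnd
  have h1 : k0 ∉ l1.map Prod.fst := by
    intro hh
    exact (List.disjoint_of_nodup_append hnd) hh (List.mem_cons_self)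
  have h2 : k0 ∉ l2.map Prod.fst := by
    have := (List.nodup_append.mp hnd).2.1
    rw [List.nodup_cons] at this
    exact this.1
  rw [List.countP_append, List.countP_append, List.countP_cons, List.countP_cons]
  rw [countP_off_upd l1 k0 h1 p q (fun x hx hne => hoff x (by simp [hx]) hne),
      countP_off_upd l2 k0 h2 p q (fun x hx hne => hoff x (by simp [hx]) hne)]
  push_cast
  by_cases hq : q (k0, v0) = true <;> by_cases hp : p (k0, v0) = true <;>
    simp [hq, hp] <;> ring

theorem items_fst_nodup (req : PySem.Dict String Int) (hnd : req.keys.Nodup) :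
    (req.items.map Prod.fst).Nodup := hnd

theorem mem_items_getD (req : PySem.Dict String Int) (hnd : req.keys.Nodup) (x : String)
    (hcon : req.contains x = true) : (x, req.getD x 0) ∈ req.items := by
  rw [PySem.Dict.contains_eq_isSome_get?] at hcon
  cases hv : req.get? x with
  | none => rw [hv] at hcon; exact absurd hcon (by simp)
  | some v =>
    have : req.getD x 0 = v := by rw [PySem.Dict.getD_eq_get?_getD, hv]; rfl
    rw [this]
    exact (PySem.Dict.get?_eq_some_iff_mem_items req x v hnd).mp hv

theorem not_mem_items_fst (req : PySem.Dict String Int) (x : String)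
    (hcon : ¬ req.contains x = true) : x ∉ req.items.map Prod.fst := by
  intro hh
  exact hcon ((PySem.Dict.contains_iff_mem_keys req x).mpr hh)

theorem upd_dec (req : PySem.Dict String Int) (hnd : req.keys.Nodup) (g : String → Int)
    (c : PySem.Dict String Int) (m : Int) (x : String)
    (hc : ∀ k, c.getD k 0 = if req.contains k then g k else 0)
    (hm : m = metG req g) (hx : 1 ≤ g x) :
    (∀ k, (if req.contains x then
            ((c.insert x (c.getD x 0 - 1)),
             (if c.getD x 0 - 1 = req.getD x 0 - 1 then m - 1 else m))
          else (c, m)).1.getD k 0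
        = if req.contains k then g k - (if k = x then 1 else 0) else 0)
    ∧ (if req.contains x then
            ((c.insert x (c.getD x 0 - 1)),
             (if c.getD x 0 - 1 = req.getD x 0 - 1 then m - 1 else m))
          else (c, m)).2
        = metG req (fun k => g k - (if k = x then 1 else 0)) := by
  by_cases hcon : req.contains x = true
  · rw [if_pos hcon]
    have hgx : c.getD x 0 = g x := by rw [hc x, if_pos hcon]
    constructor
    · intro k
      rw [PySem.Dict.getD_insert]
      by_cases hk : k = x
      · subst hk; rw [if_pos rfl, if_pos rfl, if_pos hcon, hgx]
      · rw [if_neg hk, if_neg hk, hc k]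
        split <;> ring_nf
    · have hmem := mem_items_getD req hnd x hcon
      set v := req.getD x 0 with hv
      have hupd := countP_mem_upd req.items (items_fst_nodup req hnd) x v hmem
          (fun p => decide (1 ≤ p.2 ∧ p.2 ≤ g p.1))
          (fun p => decide (1 ≤ p.2 ∧ p.2 ≤ g p.1 - (if p.1 = x then 1 else 0)))
          (by intro y _ hy; dsimp only; rw [if_neg hy] <;> norm_num)
      show (if c.getD x 0 - 1 = v - 1 then m - 1 else m) = _
      rw [metG, hupd, ← metG, ← hm, hgx]
      dsimp only
      simp only [if_pos rfl, decide_eq_true_eq]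
      split_ifs <;> omega
  · rw [if_neg hcon]
    constructor
    · intro k
      rw [hc k]
      by_cases hk : k = x
      · subst hk; rw [if_neg hcon, if_neg hcon]
      · split <;> [skip; rfl]
        norm_num
    · have hco := countP_off_upd req.items x (not_mem_items_fst req x hcon)
        (fun p => decide (1 ≤ p.2 ∧ p.2 ≤ g p.1))
        (fun p => decide (1 ≤ p.2 ∧ p.2 ≤ g p.1 - (if p.1 = x then 1 else 0)))
        (by intro y _ hy; dsimp only; rw [if_neg hy]; norm_num)
      rw [hm, metG, metG, hco]

theorem upd_inc (req : PySem.Dict String Int) (hnd : req.keys.Nodup) (g : String → Int)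
    (c : PySem.Dict String Int) (m : Int) (x : String)
    (hc : ∀ k, c.getD k 0 = if req.contains k then g k else 0)
    (hm : m = metG req g) (hx : 0 ≤ g x) :
    (∀ k, (if req.contains x then
            ((c.insert x (c.getD x 0 + 1)),
             (if c.getD x 0 + 1 = req.getD x 0 then m + 1 else m))
          else (c, m)).1.getD k 0
        = if req.contains k then g k + (if k = x then 1 else 0) else 0)
    ∧ (if req.contains x then
            ((c.insert x (c.getD x 0 + 1)),
             (if c.getD x 0 + 1 = req.getD x 0 then m + 1 else m))
          else (c, m)).2
        = metG req (fun k => g k + (if k = x then 1 else 0)) := by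
  by_cases hcon : req.contains x = true
  · rw [if_pos hcon]
    have hgx : c.getD x 0 = g x := by rw [hc x, if_pos hcon]
    constructor
    · intro k
      rw [PySem.Dict.getD_insert]
      by_cases hk : k = x
      · subst hk; rw [if_pos rfl, if_pos rfl, if_pos hcon, hgx]
      · rw [if_neg hk, if_neg hk, hc k]
        split <;> ring_nf
    · have hmem := mem_items_getD req hnd x hcon
      set v := req.getD x 0 with hv
      have hupd := countP_mem_upd req.items (items_fst_nodup req hnd) x v hmem
          (fun p => decide (1 ≤ p.2 ∧ p.2 ≤ g p.1))
          (fun p => decide (1 ≤ p.2 ∧ p.2 ≤ g p.1 + (if p.1 = x then 1 else 0)))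
          (by intro y _ hy; dsimp only; rw [if_neg hy] <;> norm_num)
      show (if c.getD x 0 + 1 = v then m + 1 else m) = _
      rw [metG, hupd, ← metG, ← hm, hgx]
      dsimp only
      simp only [if_pos rfl, decide_eq_true_eq]
      split_ifs <;> omega
  · rw [if_neg hcon]
    constructor
    · intro k
      rw [hc k]
      by_cases hk : k = x
      · subst hk; rw [if_neg hcon, if_neg hcon]
      · split <;> [skip; rfl]
        norm_num
    · have hco := countP_off_upd req.items x (not_mem_items_fst req x hcon)
        (fun p => decide (1 ≤ p.2 ∧ p.2 ≤ g p.1))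
        (fun p => decide (1 ≤ p.2 ∧ p.2 ≤ g p.1 + (if p.1 = x then 1 else 0)))
        (by intro y _ hy; dsimp only; rw [if_neg hy]; norm_num)
      rw [hm, metG, metG, hco]

theorem win_head (discount : List String) (t : Nat) (h : t + 10 ≤ discount.length) :
    winAt discount t = discount[t]'(by omega) :: ((discount.drop (t + 1)).take 9) := by
  rw [winAt, List.drop_eq_getElem_cons (by omega)]
  rfl

theorem win_last (discount : List String) (t : Nat) (h : t + 10 < discount.length) :
    winAt discount (t + 1) = ((discount.drop (t + 1)).take 9) ++ [discount[t + 10]'(by omega)] := by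
  have h1 : (discount.drop (t + 1)).take 10
      = (discount.drop (t + 1)).take 9 ++ ((discount.drop (t + 1))[9]?).toList := List.take_add_one
  rw [winAt, h1]
  congr 1
  rw [List.getElem?_drop, List.getElem?_eq_getElem (by omega)]
  simp only [Option.toList_some]

theorem window_head_count (discount : List String) (t : Nat) (h : t + 10 ≤ discount.length) :
    1 ≤ ((winAt discount t).count (discount[t]'(by omega)) : Int) := by
  rw [win_head discount t h, List.count_cons_self]
  push_cast
  omega

theorem slide (discount : List String) (t : Nat) (h : t + 10 < discount.length) (k : String) :
    ((winAt discount (t + 1)).count k : Int)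
      = ((winAt discount t).count k : Int)
        - (if discount[t]'(by omega) = k then 1 else 0)
        + (if discount[t + 10]'(by omega) = k then 1 else 0) := by
  rw [win_head discount t (by omega), win_last discount t h]
  rw [List.count_append, List.count_cons]
  by_cases h1 : discount[t]'(by omega) = k <;> by_cases h2 : discount[t + 10]'(by omega) = k <;>
    simp [h1, h2] <;> omega

theorem met_size_iff (req : PySem.Dict String Int) (w : List String) :
    (metG req (fun k => ((w.count k : Int))) = (req.size : Int)) ↔ goodW req w = true := by
  rw [metG, goodW, List.all_eq_true]
  have hsize : req.size = req.items.length := rfl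
  rw [hsize, Nat.cast_inj, List.countP_eq_length]

def bstep (req : PySem.Dict String Int) (need : Int) (discount : List String)
    (st : Int × PySem.Dict String Int × Int) (i : Int) : Int × PySem.Dict String Int × Int :=
  let answer := st.1
  let cnt := st.2.1
  let met := st.2.2
  let out := PySem.List.pyGetD discount (i - 10) ""
  let st1 :=
    if req.contains out then
      let c := cnt.getD out 0 - 1
      ((cnt.insert out c), (if c = req.getD out 0 - 1 then met - 1 else met))
    else (cnt, met)
  let nw := PySem.List.pyGetD discount i ""
  let st2 :=
    if req.contains nw then
      let c := st1.1.getD nw 0 + 1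
      ((st1.1.insert nw c), (if c = req.getD nw 0 then st1.2 + 1 else st1.2))
    else st1
  ((if st2.2 = need then answer + 1 else answer), st2.1, st2.2)

theorem metG_congr (req : PySem.Dict String Int) (g g' : String → Int)
    (h : ∀ k, g k = g' k) : metG req g = metG req g' := by
  rw [metG, metG]
  congr 1
  apply List.countP_congr
  intro p _
  rw [h p.1]

theorem ite_eq_comm (a b : String) (x y : Int) :
    (if a = b then x else y) = (if b = a then x else y) := by
  by_cases h : a = b
  · rw [if_pos h, if_pos h.symm]
  · rw [if_neg h, if_neg (fun hh => h hh.symm)]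

theorem bstep_slide (req : PySem.Dict String Int) (hnd : req.keys.Nodup) (need : Int)
    (hneed : need = (req.size : Int)) (discount : List String) (t : Nat)
    (h : t + 10 < discount.length) (a m : Int) (c : PySem.Dict String Int)
    (hc : ∀ k, c.getD k 0 = if req.contains k then ((winAt discount t).count k : Int) else 0)
    (hm : m = metG req (fun k => ((winAt discount t).count k : Int))) :
    (bstep req need discount (a, c, m) ((10 + t : Nat) : Int)).1
        = (if goodW req (winAt discount (t + 1)) then a + 1 else a)
    ∧ (∀ k, (bstep req need discount (a, c, m) ((10 + t : Nat) : Int)).2.1.getD k 0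
        = if req.contains k then ((winAt discount (t + 1)).count k : Int) else 0)
    ∧ (bstep req need discount (a, c, m) ((10 + t : Nat) : Int)).2.2
        = metG req (fun k => ((winAt discount (t + 1)).count k : Int)) := by
  have hidx1 : ((10 + t : Nat) : Int) - 10 = ((t : Nat) : Int) := by push_cast; ring
  have hout : PySem.List.pyGetD discount (((10 + t : Nat) : Int) - 10) ""
      = discount[t]'(by omega) := by
    rw [hidx1, PySem.List.pyGetD_natCast, List.getD_eq_getElem _ _ (by omega)]
  have hnw : PySem.List.pyGetD discount ((10 + t : Nat) : Int) ""
      = discount[t + 10]'(by omega) := by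
    rw [PySem.List.pyGetD_natCast, List.getD_eq_getElem _ _ (by omega)]
    simp only [show 10 + t = t + 10 from by omega]
  unfold bstep
  dsimp only
  rw [hout, hnw]
  have hdec := upd_dec req hnd (fun k => ((winAt discount t).count k : Int)) c m
      (discount[t]'(by omega)) hc hm (window_head_count discount t (by omega))
  obtain ⟨hd1, hd2⟩ := hdec
  have hx2 : (0 : Int) ≤ ((winAt discount t).count (discount[t + 10]'(by omega)) : Int)
      - (if (discount[t + 10]'(by omega)) = (discount[t]'(by omega)) then 1 else 0) := by
    by_cases he : (discount[t + 10]'(by omega)) = (discount[t]'(by omega))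
    · rw [if_pos he, he]
      have := window_head_count discount t (by omega)
      omega
    · rw [if_neg he]
      have : (0 : Int) ≤ ((winAt discount t).count (discount[t + 10]'(by omega)) : Int) := by
        positivity
      omega
  have hinc := upd_inc req hnd
      (fun k => ((winAt discount t).count k : Int) - (if k = discount[t]'(by omega) then 1 else 0))
      _ _ (discount[t + 10]'(by omega)) hd1 hd2 (by dsimp only; exact hx2)
  obtain ⟨hi1, hi2⟩ := hinc
  have hg2 : ∀ k, ((winAt discount t).count k : Int)
      - (if k = discount[t]'(by omega) then 1 else 0)
      + (if k = discount[t + 10]'(by omega) then 1 else 0)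
      = ((winAt discount (t + 1)).count k : Int) := by
    intro k
    rw [slide discount t h k, ite_eq_comm k (discount[t]'(by omega)),
        ite_eq_comm k (discount[t + 10]'(by omega))]
  refine ⟨?_, ?_, ?_⟩
  · dsimp only
    rw [hi2, metG_congr req _ _ hg2, hneed]
    cases hgw : goodW req (winAt discount (t + 1))
    · rw [if_neg (fun hh => by rw [(met_size_iff req _).mp hh] at hgw; exact absurd hgw (by simp))]
      simp
    · rw [if_pos ((met_size_iff req _).mpr hgw)]
      simp
  · intro k
    rw [hi1 k, ← hg2 k]
  · rw [hi2, metG_congr req _ _ hg2]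

theorem bstep_slide' (req : PySem.Dict String Int) (hnd : req.keys.Nodup) (need : Int)
    (hneed : need = (req.size : Int)) (discount : List String) (t : Nat)
    (h : t + 10 < discount.length) (st : Int × PySem.Dict String Int × Int)
    (hc : ∀ k, st.2.1.getD k 0 = if req.contains k then ((winAt discount t).count k : Int) else 0)
    (hm : st.2.2 = metG req (fun k => ((winAt discount t).count k : Int))) :
    (bstep req need discount st ((10 + t : Nat) : Int)).1
        = (if goodW req (winAt discount (t + 1)) then st.1 + 1 else st.1)
    ∧ (∀ k, (bstep req need discount st ((10 + t : Nat) : Int)).2.1.getD k 0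
        = if req.contains k then ((winAt discount (t + 1)).count k : Int) else 0)
    ∧ (bstep req need discount st ((10 + t : Nat) : Int)).2.2
        = metG req (fun k => ((winAt discount (t + 1)).count k : Int)) := by
  obtain ⟨a, c, m⟩ := st
  exact bstep_slide req hnd need hneed discount t h a m c hc hm

theorem loop_inv (req : PySem.Dict String Int) (hnd : req.keys.Nodup) (need : Int)
    (hneed : need = (req.size : Int)) (discount : List String) (t : Nat)
    (ht : 10 + t ≤ discount.length) (a0 m0 : Int) (c0 : PySem.Dict String Int)
    (hc0 : ∀ k, c0.getD k 0 = if req.contains k then ((winAt discount 0).count k : Int) else 0)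
    (hm0 : m0 = metG req (fun k => ((winAt discount 0).count k : Int))) :
    ((PySem.List.pyRange 10 ((10 + t : Nat) : Int) 1).foldl (bstep req need discount) (a0, c0, m0)).1
      = a0 + ((List.range t).countP (fun j => goodW req (winAt discount (j + 1))) : Int)
    ∧ (∀ k, ((PySem.List.pyRange 10 ((10 + t : Nat) : Int) 1).foldl (bstep req need discount) (a0, c0, m0)).2.1.getD k 0
        = if req.contains k then ((winAt discount t).count k : Int) else 0)
    ∧ ((PySem.List.pyRange 10 ((10 + t : Nat) : Int) 1).foldl (bstep req need discount) (a0, c0, m0)).2.2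
        = metG req (fun k => ((winAt discount t).count k : Int)) := by
  induction t with
  | zero =>
    rw [show ((10 + 0 : Nat) : Int) = 10 from by norm_num,
        PySem.List.pyRange_one_eq_nil (le_refl 10), List.foldl_nil]
    exact ⟨by simp, hc0, hm0⟩
  | succ t ih =>
    have hlt : t + 10 < discount.length := by omega
    have ihh := ih (by omega)
    have hr : PySem.List.pyRange 10 ((10 + (t + 1) : Nat) : Int) 1
        = PySem.List.pyRange 10 ((10 + t : Nat) : Int) 1 ++ [((10 + t : Nat) : Int)] := by
      rw [show ((10 + (t + 1) : Nat) : Int) = ((10 + t : Nat) : Int) + 1 from by push_cast; ring]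
      exact PySem.List.pyRange_one_succ_right (by push_cast; omega)
    rw [hr, List.foldl_append, List.foldl_cons, List.foldl_nil]
    have hs := bstep_slide' req hnd need hneed discount t hlt
        ((PySem.List.pyRange 10 ((10 + t : Nat) : Int) 1).foldl (bstep req need discount) (a0, c0, m0))
        ihh.2.1 ihh.2.2
    refine ⟨?_, hs.2.1, hs.2.2⟩
    rw [hs.1, ihh.1, List.range_succ, List.countP_append, List.countP_cons]
    cases hgw : goodW req (winAt discount (t + 1))
    · simp [hgw]
    · simp [hgw]
      push_cast
      ring

theorem B_char (want : List String) (number : List Int) (discount : List String) :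
    solution_alt want number discount = countF (reqOf want number) discount := by
  by_cases hlen : discount.length < 10
  · have h0 : solution_alt want number discount = 0 := by
      rw [solution_alt, if_pos hlen]
    rw [h0, countF, show ((discount.length : Int) - 9).toNat = 0 from by omega]
    by_cases h9 : discount.length = 9
    · rfl
    · rfl
  · set req := reqOf want number with hreq
    set cnt0 : PySem.Dict String Int := (PySem.List.slice discount none (some 10)).foldl
        (fun c d => if req.contains d then c.insert d (c.getD d 0 + 1) else c)
        PySem.Dict.empty with hcnt0def
    set met0 := req.items.foldl
        (fun met p => if 1 ≤ p.2 ∧ p.2 ≤ cnt0.getD p.1 0 then met + 1 else met) (0 : Int)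
        with hmet0def
    have hrfl : solution_alt want number discount
        = if discount.length < 10 then 0 else
            ((PySem.List.pyRange 10 (discount.length : Int) 1).foldl
              (bstep req (req.size : Int) discount)
              ((if met0 = (req.size : Int) then 1 else 0), cnt0, met0)).1 := rfl
    rw [hrfl, if_neg hlen]
    have hwin0 : winAt discount 0 = PySem.List.slice discount none (some 10) := by
      rw [PySem.List.slice_to discount (by norm_num), winAt, List.drop_zero]
      rfl
    have hcnt0 : ∀ k, cnt0.getD k 0
        = if req.contains k then ((winAt discount 0).count k : Int) else 0 := by
      intro k
      rw [hcnt0def, cnt_fold req _ PySem.Dict.empty k, hwin0]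
      simp
    have hmet0 : met0 = metG req (fun k => ((winAt discount 0).count k : Int)) := by
      rw [hmet0def, PySem.List.foldl_ite_add_one
            (fun p : String × Int => 1 ≤ p.2 ∧ p.2 ≤ cnt0.getD p.1 0), zero_add, metG]
      congr 1
      apply List.countP_congr
      intro p hp
      have hcon : req.contains p.1 = true :=
        (PySem.Dict.contains_iff_mem_keys req p.1).mpr (PySem.Dict.mem_keys_of_mem_items req hp)
      have := hcnt0 p.1
      rw [if_pos hcon] at this
      rw [this]
    have hnd : req.keys.Nodup := nodup_keys_reqOf want number
    have hcast : (discount.length : Int) = ((10 + (discount.length - 10) : Nat) : Int) := by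
      omega
    rw [hcast]
    have hinv := loop_inv req hnd (req.size : Int) rfl discount (discount.length - 10)
        (by omega) (if met0 = (req.size : Int) then 1 else 0) met0 cnt0 hcnt0 hmet0
    rw [hinv.1, countF, show ((discount.length : Int) - 9).toNat = (discount.length - 10) + 1 from by omega]
    rw [List.range_succ_eq_map, List.countP_cons, List.countP_map]
    have hms := met_size_iff req (winAt discount 0)
    have hcomp : ((fun s => goodW req (winAt discount s)) ∘ Nat.succ)
        = (fun j => goodW req (winAt discount (j + 1))) := rfl
    cases hgw : goodW req (winAt discount 0)
    · rw [if_neg (fun hh : met0 = (req.size : Int) => by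
        rw [hmet0] at hh
        rw [hms.mp hh] at hgw
        exact absurd hgw (by simp))]
      rw [hcomp]
      norm_num
    · rw [if_pos (by rw [hmet0]; exact hms.mpr hgw)]
      rw [hcomp]
      norm_num
      push_cast
      omega


-- ===== VERDICT (by name: the statement is the Claim_ definition above) =====
theorem solution_spec : Claim_equal_solution := by
  intro want number discount _hdom hpre
  unfold Spec_solution
  exact (A_char want number discount hpre).trans (B_char want number discount).symm
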